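-- pv_equiv track=rewrite | github.com/jkkummerfeld/berkeley-parser-analyser | archival_versions/emnlp2012/util.py | cut_text_below
-- ===== SOURCE A (Python) =====
-- def cut_text_below(text, depth):
-- 	'''Simplify text to only show the top parts of a tree
-- 	>>> print cut_text_below("(ROOT (NP (PRP I)) (VP (VBD ran) (NP (NN home))))", 1)
-- 	(ROOT)
-- 	>>> print cut_text_below("(ROOT (NP (PRP I)) (VP (VBD ran) (NP (NN home))))", 2)
-- 	(ROOT (NP) (VP))
-- 	>>> print cut_text_below("(ROOT (NP (PRP I)) (VP (VBD ran) (NP (NN home))))", 3)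
-- 	(ROOT (NP (PRP I)) (VP (VBD ran) (NP)))
-- 	>>> print cut_text_below("(ROOT (NP (PRP I)) (VP (VBD ran) (NP (NN home))))", 20)
-- 	(ROOT (NP (PRP I)) (VP (VBD ran) (NP (NN home))))
-- 	'''
-- 	# TODO: Adjust to play nicely with colours
--
-- 	# Cut lower content
-- 	cdepth = 0
-- 	ntext = ''
-- 	for char in text:
-- 		if char == '(':
-- 			cdepth += 1
-- 		if cdepth <= depth:
-- 			ntext += char
-- 		if char == ')':
-- 			cdepth -= 1
--
-- 	# Walk back and remove extra whitespace
-- 	text = ntext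
-- 	ntext = ''
-- 	ignore = False
-- 	for char in text[::-1]:
-- 		if char == ')':
-- 			ignore = True
-- 			ntext += char
-- 		elif ignore:
-- 			if char != ' ':
-- 				ntext += char
-- 				ignore = False
-- 		else:
-- 			ntext += char
-- 	return ntext[::-1]
-- ===== SOURCE B (Python) =====
-- def cut_text_below(text, depth):
--     """Single left-to-right pass: depth-filter chars, buffering kept spaces;
--     a kept ')' discards the buffered spaces, any other kept char flushes them."""
--     cdepth = 0
--     out = []
--     pending = []
--     for char in text:
--         if char == '(':
--             cdepth += 1
--         if cdepth <= depth:
--             if char == ')':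
--                 pending = []
--                 out.append(')')
--             elif char == ' ':
--                 pending.append(' ')
--             else:
--                 out.extend(pending)
--                 pending = []
--                 out.append(char)
--         if char == ')':
--             cdepth -= 1
--     out.extend(pending)
--     return ''.join(out)
-- ===== Notes on version B (the rewrite author's own statement) =====
-- stated objective: simpler
-- what changed: Replaces A's two passes (depth-filter building an intermediate string, then a reversed walk stripping spaces before ')') with a single left-to-right pass that buffers kept spaces and drops the buffer when a kept ')' arrives.
import Mathlib
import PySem

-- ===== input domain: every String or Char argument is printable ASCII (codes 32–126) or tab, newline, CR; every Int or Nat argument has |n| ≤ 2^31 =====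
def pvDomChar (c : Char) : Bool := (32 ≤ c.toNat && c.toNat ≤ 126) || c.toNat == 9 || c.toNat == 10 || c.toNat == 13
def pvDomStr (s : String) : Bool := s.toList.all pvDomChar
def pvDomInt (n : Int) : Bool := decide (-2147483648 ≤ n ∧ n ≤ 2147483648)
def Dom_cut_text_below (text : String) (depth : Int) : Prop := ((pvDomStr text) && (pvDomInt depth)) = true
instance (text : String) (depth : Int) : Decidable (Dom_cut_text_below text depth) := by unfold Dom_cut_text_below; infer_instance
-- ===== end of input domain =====

-- B replaces A's build-then-reverse-walk with one forward pass that buffers kept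
-- spaces and drops the buffer at a kept ')' (objective: simpler, same cost).

-- ===== PORT A =====
-- first loop of A: depth-filter the characters ('(' bumps cdepth before the
-- test, ')' after it); acc grows at the back like ntext += char
def cutPass1 (depth : Int) : Int → List Char → List Char
  | _, [] => []
  | d, c :: cs =>
    let d1 := if c = '(' then d + 1 else d
    let keep := if d1 ≤ depth then [c] else []
    let d2 := if c = ')' then d1 - 1 else d1
    keep ++ cutPass1 depth d2 cs
-- second loop of A over text[::-1]: the Bool is `ignore`; output in emission order
def cutPass2 : Bool → List Char → List Char
  | _, [] => []
  | ig, c :: cs =>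
    if c = ')' then c :: cutPass2 true cs
    else if ig then (if c ≠ ' ' then c :: cutPass2 false cs else cutPass2 true cs)
    else c :: cutPass2 ig cs

def cut_text_below (text : String) (depth : Int) : String :=
  String.mk ((cutPass2 false (cutPass1 depth 0 text.toList).reverse).reverse)

-- ===== PORT B =====
-- B's single loop: state = (cdepth, pending); out is built by the recursion,
-- leftover pending is flushed at the end
def cutGo (depth : Int) : Int → List Char → List Char → List Char
  | _, pending, [] => pending
  | d, pending, c :: cs =>
    let d1 := if c = '(' then d + 1 else d
    let d2 := if c = ')' then d1 - 1 else d1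
    if d1 ≤ depth then
      if c = ')' then ')' :: cutGo depth d2 [] cs
      else if c = ' ' then cutGo depth d2 (pending ++ [' ']) cs
      else pending ++ c :: cutGo depth d2 [] cs
    else cutGo depth d2 pending cs

def cut_text_below_alt (text : String) (depth : Int) : String :=
  String.mk (cutGo depth 0 [] text.toList)

-- ===== PRECONDITION & SPEC =====
def Spec_cut_text_below (text : String) (depth : Int) (out : String) : Prop := out = cut_text_below_alt text depth
instance (text : String) (depth : Int) (out : String) : Decidable (Spec_cut_text_below text depth out) := by unfold Spec_cut_text_below; infer_instance

-- ===== CLAIM (what is proved, stated in full; the proofs are below) =====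
def Claim_equal_cut_text_below : Prop := ∀ (text : String) (depth : Int), Dom_cut_text_below text depth → Spec_cut_text_below text depth (cut_text_below text depth)

-- ===== LEMMAS AND PROOFS =====

-- proof helper: forward space-buffering pass, returning (output, leftover pending)
def clF : List Char → List Char → List Char × List Char
  | pending, [] => ([], pending)
  | pending, c :: cs =>
    if c = ')' then
      let r := clF [] cs
      (')' :: r.1, r.2)
    else if c = ' ' then clF (pending ++ [' ']) cs
    else
      let r := clF [] cs
      (pending ++ c :: r.1, r.2)

theorem clF_snoc (xs : List Char) (c : Char) (pending : List Char) :
    clF pending (xs ++ [c]) =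
      let r := clF pending xs
      if c = ')' then (r.1 ++ [')'], [])
      else if c = ' ' then (r.1, r.2 ++ [' '])
      else (r.1 ++ r.2 ++ [c], []) := by
  induction xs generalizing pending with
  | nil =>
    by_cases h1 : c = ')'
    · subst h1; simp [clF]
    · by_cases h2 : c = ' '
      · subst h2; simp [clF, h1]
      · simp [clF, h1, h2]
  | cons x xs ih =>
    simp only [List.cons_append, clF]
    split_ifs with hx1 hx2 <;> simp [ih] <;> split_ifs <;> simp_all

-- A's second (reversed) walk equals the forward space-buffering pass
theorem pass2_eq_clF (r : List Char) :
    (cutPass2 false r).reverse = (clF [] r.reverse).1 ++ (clF [] r.reverse).2 ∧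
    (cutPass2 true r).reverse = (clF [] r.reverse).1 := by
  induction r with
  | nil => simp [cutPass2, clF]
  | cons c cs ih =>
    have hs : (c :: cs).reverse = cs.reverse ++ [c] := by simp
    rw [hs, clF_snoc]
    by_cases h1 : c = ')'
    · subst h1
      constructor <;> simp [cutPass2, ih.2]
    · by_cases h2 : c = ' '
      · subst h2
        have h1' : (' ' : Char) ≠ ')' := by decide
        constructor <;> simp [cutPass2, h1', ih.1, ih.2]
      · constructor <;> simp [cutPass2, h1, h2, ih.1]

-- fusion: B's single loop = clF applied to A's depth-filtered string
theorem cutGo_eq_clF (depth : Int) (cs : List Char) (d : Int) (pending : List Char) :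
    cutGo depth d pending cs =
      (clF pending (cutPass1 depth d cs)).1 ++ (clF pending (cutPass1 depth d cs)).2 := by
  induction cs generalizing d pending with
  | nil => simp [cutGo, cutPass1, clF]
  | cons c cs ih =>
    simp only [cutGo, cutPass1]
    by_cases hk : (if c = '(' then d + 1 else d) ≤ depth
    · by_cases h1 : c = ')' <;> by_cases h2 : c = ' ' <;>
        simp_all [clF]
    · simp [hk, ih]

-- ===== VERDICT (by name: the statement is the Claim_ definition above) =====
theorem cut_text_below_spec : Claim_equal_cut_text_below := by
  intro text depth _
  unfold Spec_cut_text_below cut_text_below cut_text_below_alt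
  rw [cutGo_eq_clF]
  rw [(pass2_eq_clF (cutPass1 depth 0 text.toList).reverse).1]
  simp
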